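-- pv_equiv track=rewrite | github.com/urbanAIthi/VRU_Aware_GLOSA | simulations/vru_aware_glosa.py | get_next_green_info
-- ===== SOURCE A (Python) =====
-- def get_next_green_info(up_states: list[str]) -> tuple[int | None, int]:
--     """Return (seconds_until_next_green, green_duration_s) from a future-states list."""
--     time_to_green  = None
--     green_duration = 0
--
--     for i, s in enumerate(up_states):
--         if s == "g":
--             time_to_green = i + 1
--             for s2 in up_states[i:]:
--                 if s2 == "g":
--                     green_duration += 1
--                 else:
--                     break
--             break
--
--     return time_to_green, green_duration
-- ===== SOURCE B (Python) =====
-- def get_next_green_info(up_states: list[str]) -> tuple[int | None, int]: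
--     """Right-to-left fold: build the answer for each suffix from the suffix after it."""
--     ans = (None, 0)   # answer for the current suffix
--     run = 0           # length of the leading 'g' run of the current suffix
--     for s in reversed(up_states):
--         if s == "g":
--             run += 1
--             ans = (1, run)
--         else:
--             run = 0
--             t, d = ans
--             ans = (t + 1, d) if t is not None else (None, 0)
--     return ans
-- ===== Notes on version B (the rewrite author's own statement) =====
-- stated objective: alternative
-- what changed: Replaced A's left-to-right scan with a nested run-count over the slice by a right-to-left fold that builds each suffix's answer (time shifted by one, or reset at a 'g' using the tracked leading-g run length) from the suffix after it.
import Mathlib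
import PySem

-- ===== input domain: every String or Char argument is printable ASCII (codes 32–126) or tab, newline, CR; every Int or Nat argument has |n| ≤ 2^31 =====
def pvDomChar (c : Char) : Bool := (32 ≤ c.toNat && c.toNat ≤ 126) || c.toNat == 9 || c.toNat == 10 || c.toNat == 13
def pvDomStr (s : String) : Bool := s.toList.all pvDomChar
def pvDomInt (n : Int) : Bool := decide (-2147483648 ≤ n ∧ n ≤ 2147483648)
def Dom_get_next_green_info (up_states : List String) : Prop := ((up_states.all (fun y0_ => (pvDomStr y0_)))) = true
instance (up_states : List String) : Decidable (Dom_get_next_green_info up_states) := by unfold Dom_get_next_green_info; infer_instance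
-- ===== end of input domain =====

-- B replaces A's left-to-right scan with inner run count by a right-to-left fold
-- that builds each suffix's answer from the suffix after it (alternative decomposition).

-- ===== PORT A =====
-- inner loop: 'for s2 in up_states[i:]: if s2 == "g": green_duration += 1 else: break'
def pvAInner : List String → Int → Int
  | [], acc => acc
  | s2 :: rest, acc => if s2 = "g" then pvAInner rest (acc + 1) else acc

-- outer loop over enumerate(up_states); i is the current index, the suffix is up_states[i:]
def pvALoop : List String → Int → Option Int × Int
  | [], _ => (none, 0)
  | s :: rest, i =>
      if s = "g" then (some (i + 1), pvAInner (s :: rest) 0)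
      else pvALoop rest (i + 1)

def get_next_green_info (up_states : List String) : Option Int × Int :=
  pvALoop up_states 0

-- ===== PORT B =====
-- one step of the loop body of Source B: state = (ans, run), scanned element s
def pvBStep (st : (Option Int × Int) × Int) (s : String) : (Option Int × Int) × Int :=
  if s = "g" then ((some 1, st.2 + 1), st.2 + 1)
  else
    match st.1.1 with
    | some t => ((some (t + 1), st.1.2), 0)
    | none => ((none, 0), 0)

-- 'for s in reversed(up_states)': fold over the reversed list
def get_next_green_info_alt (up_states : List String) : Option Int × Int :=
  (up_states.reverse.foldl pvBStep ((none, 0), 0)).1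

-- ===== PRECONDITION & SPEC =====
def Spec_get_next_green_info (up_states : List String) (out : Option Int × Int) : Prop := out = get_next_green_info_alt up_states
instance (up_states : List String) (out : Option Int × Int) : Decidable (Spec_get_next_green_info up_states out) := by unfold Spec_get_next_green_info; infer_instance

-- ===== CLAIM (what is proved, stated in full; the proofs are below) =====
def Claim_equal_get_next_green_info : Prop := ∀ (up_states : List String), Dom_get_next_green_info up_states → Spec_get_next_green_info up_states (get_next_green_info up_states)

-- ===== LEMMAS AND PROOFS =====

theorem pvAInner_acc (l : List String) (acc : Int) :
    pvAInner l acc = acc + pvAInner l 0 := by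
  induction l generalizing acc with
  | nil => simp [pvAInner]
  | cons y ys ih =>
      simp only [pvAInner]
      by_cases h : y = "g"
      · simp only [if_pos h]
        rw [ih (acc + 1), ih (0 + 1)]; ring
      · simp [h]

theorem pvALoop_shift (l : List String) (off : Int) :
    pvALoop l off = ((pvALoop l 0).1.map (· + off), (pvALoop l 0).2) := by
  induction l generalizing off with
  | nil => simp [pvALoop]
  | cons y ys ih =>
      simp only [pvALoop]
      by_cases h : y = "g"
      · simp [h, Int.add_comm]
      · simp only [if_neg h]
        rw [ih (off + 1), ih (0 + 1)]
        cases (pvALoop ys 0).1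
        · simp
        · simp; ring

theorem pvALoop_none (l : List String) (off : Int) (h : (pvALoop l off).1 = none) :
    pvALoop l off = (none, 0) := by
  induction l generalizing off with
  | nil => simp [pvALoop]
  | cons y ys ih =>
      simp only [pvALoop] at h ⊢
      by_cases hy : y = "g"
      · simp [hy] at h
      · simp only [if_neg hy] at h ⊢
        exact ih (off + 1) h

theorem pvB_foldr (l : List String) :
    l.foldr (fun s st => pvBStep st s) ((none, 0), 0) = (pvALoop l 0, pvAInner l 0) := by
  induction l with
  | nil => simp [pvALoop, pvAInner]
  | cons s rest ih =>
      simp only [List.foldr, ih]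
      by_cases h : s = "g"
      · simp only [pvBStep, if_pos h, pvALoop, pvAInner]
        rw [pvAInner_acc rest (0 + 1)]
        simp only [Prod.mk.injEq]
        norm_num [Int.add_comm]
      · simp only [pvBStep, pvALoop, pvAInner, if_neg h]
        rw [pvALoop_shift rest (0 + 1)]
        cases ha : (pvALoop rest 0).1 with
        | none =>
            have := pvALoop_none rest 0 ha
            simp [this]
        | some t => simp

-- ===== VERDICT (by name: the statement is the Claim_ definition above) =====
theorem get_next_green_info_spec : Claim_equal_get_next_green_info := by
  intro l _
  unfold Spec_get_next_green_info get_next_green_info get_next_green_info_alt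
  rw [List.foldl_reverse]
  have := pvB_foldr l
  simp only [this]
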